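-- pv_equiv track=rewrite | github.com/Sacilave/python-relive | Tasks.py | prefixSuffix
-- ===== SOURCE A (Python) =====
-- def prefixSuffix(nums):
--     """
--     给你一个整数数组 nums，返回一个新的数组 answer，其中 answer[i] 等于 nums 中 左侧所有元素的和 与 右侧所有元素的和 之和。
--     要求：不要使用额外的数组（即 O(1) 额外空间，除了 answer 本身）。时间复杂度为 O(n)。
--     """
--     n = len(nums)
--     pre = [0] * n
--     suf = [0] * n
--     for i in range(1, n):
--         pre[i] = pre[i - 1] + nums[i - 1]
--     for i in range(n - 2, -1, -1):
--         suf[i] = suf[i + 1] + nums[i + 1]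
--     return [p + s for p, s in zip(pre, suf)]
-- ===== SOURCE B (Python) =====
-- def prefixSuffix(nums):
--     total = sum(nums)
--     return [total - x for x in nums]
-- ===== Notes on version B (the rewrite author's own statement) =====
-- stated objective: simpler
-- what changed: Replaces the two prefix/suffix array sweeps and the zip by the identity answer[i] = sum(nums) - nums[i]: one sum reduction plus one map, keeping only a scalar.
import Mathlib
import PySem

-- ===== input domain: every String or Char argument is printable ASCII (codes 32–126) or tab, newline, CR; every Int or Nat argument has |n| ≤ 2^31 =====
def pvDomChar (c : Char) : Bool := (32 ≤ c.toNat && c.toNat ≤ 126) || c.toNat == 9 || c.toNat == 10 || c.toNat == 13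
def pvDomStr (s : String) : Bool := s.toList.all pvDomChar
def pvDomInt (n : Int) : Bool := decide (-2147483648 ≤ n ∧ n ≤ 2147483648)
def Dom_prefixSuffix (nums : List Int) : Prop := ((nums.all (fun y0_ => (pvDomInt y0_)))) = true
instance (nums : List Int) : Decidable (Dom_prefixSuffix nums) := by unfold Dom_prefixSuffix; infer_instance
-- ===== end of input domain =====

-- B computes answer[i] as sum(nums) - nums[i] (one reduction + one map) instead of A's
-- forward and backward index-array sweeps plus zip; return values proved identical.

-- ===== PORT A =====
-- loop body of A's first for-loop: pre[i] = pre[i-1] + nums[i-1]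
def preStep (nums pre : List Int) (i : Int) : List Int :=
  PySem.List.pySetD pre i (PySem.List.pyGetD pre (i - 1) 0 + PySem.List.pyGetD nums (i - 1) 0)

-- loop body of A's second for-loop: suf[i] = suf[i+1] + nums[i+1]
def sufStep (nums suf : List Int) (i : Int) : List Int :=
  PySem.List.pySetD suf i (PySem.List.pyGetD suf (i + 1) 0 + PySem.List.pyGetD nums (i + 1) 0)

def prefixSuffix (nums : List Int) : List Int :=
  let n : Int := nums.length
  let pre : List Int :=
    (PySem.List.pyRange 1 n 1).foldl (preStep nums) (List.replicate n.toNat 0)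
  let suf : List Int :=
    (PySem.List.pyRange (n - 2) (-1) (-1)).foldl (sufStep nums) (List.replicate n.toNat 0)
  (pre.zip suf).map (fun ps => ps.1 + ps.2)

-- ===== PORT B =====
def prefixSuffix_alt (nums : List Int) : List Int :=
  let total : Int := nums.sum
  nums.map (fun x => total - x)

-- ===== PRECONDITION & SPEC =====
def Spec_prefixSuffix (nums : List Int) (out : List Int) : Prop := out = prefixSuffix_alt nums
instance (nums : List Int) (out : List Int) : Decidable (Spec_prefixSuffix nums out) := by unfold Spec_prefixSuffix; infer_instance

-- ===== CLAIM (what is proved, stated in full; the proofs are below) =====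
def Claim_equal_prefixSuffix : Prop := ∀ (nums : List Int), Dom_prefixSuffix nums → Spec_prefixSuffix nums (prefixSuffix nums)

-- ===== LEMMAS AND PROOFS =====

-- the pre array after processing indices 1..k-1: entry j holds sum(nums[:j]) for j < k, else 0
def psP (nums : List Int) (k : Nat) : List Int :=
  (List.range nums.length).map (fun j => if j < k then (nums.take j).sum else 0)

-- the suf array after processing indices n-2..m: entry j holds sum(nums[j+1:]) for m ≤ j, else 0
def psQ (nums : List Int) (m : Nat) : List Int :=
  (List.range nums.length).map (fun j => if m ≤ j then (nums.drop (j + 1)).sum else 0)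

theorem psP_getElem (nums : List Int) (k j : Nat) (h : j < (psP nums k).length) :
    (psP nums k)[j] = if j < k then (nums.take j).sum else 0 := by
  simp [psP]

theorem psQ_getElem (nums : List Int) (m j : Nat) (h : j < (psQ nums m).length) :
    (psQ nums m)[j] = if m ≤ j then (nums.drop (j + 1)).sum else 0 := by
  simp [psQ]

theorem psP_length (nums : List Int) (k : Nat) : (psP nums k).length = nums.length := by
  simp [psP]

theorem psQ_length (nums : List Int) (m : Nat) : (psQ nums m).length = nums.length := by
  simp [psQ]

theorem psP_zero_eq (nums : List Int) :
    List.replicate nums.length (0 : Int) = psP nums 1 := by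
  apply List.ext_getElem
  · simp [psP]
  · intro j h1 h2
    simp only [psP, List.getElem_replicate, List.getElem_map, List.getElem_range]
    rcases Nat.lt_or_ge j 1 with h | h
    · interval_cases j; simp
    · simp [Nat.not_lt.mpr h]

theorem psP_fold (nums : List Int) (k : Nat) (h1 : 1 ≤ k) (h2 : k ≤ nums.length) :
    (PySem.List.pyRange 1 (k : Int) 1).foldl (preStep nums) (List.replicate nums.length 0)
      = psP nums k := by
  induction k with
  | zero => omega
  | succ k ih =>
    rcases Nat.lt_or_ge k 1 with hk | hk
    · have hk0 : k = 0 := by omega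
      subst hk0
      rw [show ((1 : Nat) : Int) = 1 by norm_num, PySem.List.pyRange_one_eq_nil (by norm_num)]
      simpa using psP_zero_eq nums
    · have hkn : k < nums.length := by omega
      have hsplit : PySem.List.pyRange 1 ((k : Int) + 1) 1
          = PySem.List.pyRange 1 (k : Int) 1 ++ [(k : Int)] :=
        PySem.List.pyRange_one_succ_right (by exact_mod_cast hk)
      rw [show ((k + 1 : Nat) : Int) = (k : Int) + 1 by push_cast; ring, hsplit,
        List.foldl_append, ih hk (by omega)]
      -- step on psP k at index k yields psP (k+1)
      have hkm1 : (k : Int) - 1 = ((k - 1 : Nat) : Int) := by omega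
      have hpre : PySem.List.pyGetD (psP nums k) ((k : Int) - 1) 0
          = (nums.take (k - 1)).sum := by
        rw [hkm1, PySem.List.pyGetD_natCast,
          List.getD_eq_getElem (psP nums k) 0 (by rw [psP_length]; omega),
          psP_getElem nums k (k - 1) (by rw [psP_length]; omega), if_pos (by omega)]
      have hnum : PySem.List.pyGetD nums ((k : Int) - 1) 0
          = nums[k - 1]'(by omega) := by
        rw [hkm1, PySem.List.pyGetD_natCast, List.getD_eq_getElem nums 0 (by omega)]
      have hsum : (nums.take (k - 1)).sum + nums[k - 1]'(by omega) = (nums.take k).sum := by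
        have := List.sum_take_succ nums (k - 1) (by omega)
        rw [show k - 1 + 1 = k by omega] at this
        omega
      simp only [List.foldl_cons, List.foldl_nil, preStep, hpre, hnum, PySem.List.pySetD_natCast]
      apply List.ext_getElem
      · rw [List.length_set, psP_length, psP_length]
      · intro j hj hj'
        have hjn : j < nums.length := by
          rw [List.length_set, psP_length] at hj; exact hj
        rw [List.getElem_set, psP_getElem nums (k + 1) j (by rw [psP_length]; exact hjn)]
        by_cases hjk : k = j
        · rw [if_pos hjk, if_pos (by omega)]
          rw [← hjk]; exact hsum
        · rw [if_neg hjk, psP_getElem nums k j (by rw [psP_length]; exact hjn)]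
          by_cases hlt : j < k
          · rw [if_pos hlt, if_pos (by omega)]
          · rw [if_neg hlt, if_neg (by omega)]

theorem psQ_fold (nums : List Int) (k : Nat) (h2 : k ≤ nums.length - 1) (hn : 1 ≤ nums.length) :
    (PySem.List.pyRange ((k : Int) - 1) (-1) (-1)).foldl (sufStep nums) (psQ nums k)
      = psQ nums 0 := by
  induction k with
  | zero =>
    rw [PySem.List.pyRange_neg_one_eq_nil (by norm_num)]
    simp
  | succ k ih =>
    have hkn : k + 1 < nums.length := by omega
    have hcons : PySem.List.pyRange (((k + 1 : Nat) : Int) - 1) (-1) (-1)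
        = (k : Int) :: PySem.List.pyRange ((k : Int) - 1) (-1) (-1) := by
      rw [show (((k + 1 : Nat) : Int) - 1) = (k : Int) by push_cast; ring]
      exact PySem.List.pyRange_neg_one_cons (by omega)
    rw [hcons, List.foldl_cons]
    have hstep : sufStep nums (psQ nums (k + 1)) (k : Int) = psQ nums k := by
      have hkp1 : (k : Int) + 1 = ((k + 1 : Nat) : Int) := by push_cast; ring
      have hsufv : PySem.List.pyGetD (psQ nums (k + 1)) ((k : Int) + 1) 0
          = (nums.drop (k + 2)).sum := by
        rw [hkp1, PySem.List.pyGetD_natCast,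
          List.getD_eq_getElem (psQ nums (k + 1)) 0 (by rw [psQ_length]; omega),
          psQ_getElem nums (k + 1) (k + 1) (by rw [psQ_length]; omega), if_pos le_rfl,
          show k + 1 + 1 = k + 2 by omega]
      have hnum : PySem.List.pyGetD nums ((k : Int) + 1) 0 = nums[k + 1]'hkn := by
        rw [hkp1, PySem.List.pyGetD_natCast, List.getD_eq_getElem nums 0 hkn]
      have hsum : (nums.drop (k + 2)).sum + nums[k + 1]'hkn = (nums.drop (k + 1)).sum := by
        have := List.sum_drop_succ nums (k + 1) hkn
        rw [show k + 1 + 1 = k + 2 by omega] at this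
        omega
      simp only [sufStep, hsufv, hnum, PySem.List.pySetD_natCast]
      apply List.ext_getElem
      · rw [List.length_set, psQ_length, psQ_length]
      · intro j hj hj'
        have hjn : j < nums.length := by
          rw [List.length_set, psQ_length] at hj; exact hj
        rw [List.getElem_set, psQ_getElem nums k j (by rw [psQ_length]; exact hjn)]
        by_cases hjk : k = j
        · rw [if_pos hjk, if_pos (by omega)]
          rw [← hjk]; exact hsum
        · rw [if_neg hjk, psQ_getElem nums (k + 1) j (by rw [psQ_length]; exact hjn)]
          by_cases hle : k ≤ j
          · rw [if_pos (by omega), if_pos hle]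
          · rw [if_neg (by omega), if_neg hle]
    rw [hstep]
    exact ih (by omega)

theorem psQ_init_eq (nums : List Int) :
    List.replicate nums.length (0 : Int) = psQ nums (nums.length - 1) := by
  apply List.ext_getElem
  · simp [psQ]
  · intro j h1 h2
    simp only [psQ, List.getElem_replicate, List.getElem_map, List.getElem_range]
    have hj : j < nums.length := by simpa using h1
    by_cases h : nums.length - 1 ≤ j
    · have : j = nums.length - 1 := by omega
      subst this
      rw [if_pos h, show nums.length - 1 + 1 = nums.length by omega]
      simp
    · rw [if_neg h]

theorem prefixSuffix_spec : Claim_equal_prefixSuffix := by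
  unfold Claim_equal_prefixSuffix
  intro nums _
  unfold Spec_prefixSuffix
  rcases Nat.eq_zero_or_pos nums.length with hn | hn
  · have : nums = [] := List.eq_nil_of_length_eq_zero hn
    subst this
    simp [prefixSuffix, prefixSuffix_alt,
      PySem.List.pyRange_one_eq_nil (by norm_num : (0:Int) ≤ 1)]
  · have hpre : (PySem.List.pyRange 1 (nums.length : Int) 1).foldl (preStep nums)
        (List.replicate ((nums.length : Int)).toNat 0) = psP nums nums.length := by
      rw [show ((nums.length : Int)).toNat = nums.length by omega]
      exact psP_fold nums nums.length hn le_rfl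
    have hsuf : (PySem.List.pyRange ((nums.length : Int) - 2) (-1) (-1)).foldl (sufStep nums)
        (List.replicate ((nums.length : Int)).toNat 0) = psQ nums 0 := by
      rw [show ((nums.length : Int)).toNat = nums.length by omega,
        show ((nums.length : Int) - 2) = ((nums.length - 1 : Nat) : Int) - 1 by omega,
        psQ_init_eq nums]
      exact psQ_fold nums (nums.length - 1) le_rfl hn
    show prefixSuffix nums = prefixSuffix_alt nums
    unfold prefixSuffix prefixSuffix_alt
    simp only [hpre, hsuf]
    apply List.ext_getElem
    · simp [psP, psQ]
    · intro j hj hj'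
      have hjn : j < nums.length := by simpa using hj'
      simp only [List.getElem_map, List.getElem_zip, psP, psQ, List.getElem_range]
      rw [if_pos hjn, if_pos (Nat.zero_le j)]
      have htd : (nums.take j).sum + (nums.drop j).sum = nums.sum := by
        rw [← List.sum_append, List.take_append_drop]
      have hd : (nums.drop j).sum = nums[j] + (nums.drop (j + 1)).sum := by
        have := List.sum_drop_succ nums j hjn
        omega
      omega
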